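-- pv_equiv track=rewrite | github.com/smithlabcode/smurfseq_scripts | semisim/evalSmurfSim.py | getNucsAccuracy
-- ===== SOURCE A (Python) =====
-- def getNucsAccuracy(actual, predicted):
--     """
--     tabulate the true positives, false positive and false negatives
--     for identifying the mapping locations of each nucleotide in the
--     simulated SMURF-seq read within the reference genome
--     """
--     tpNucs = 0
--     fpNucs = 0
--     for i in predicted:
--         if i in actual:
--             for j in predicted[i]:
--                 pVal = predicted[i][j]
--                 if j in actual[i]:
--                     tpNucs += min(actual[i][j], pVal)
--                     if pVal > actual[i][j]:
--                         fpNucs += (pVal - actual[i][j])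
--                 else: fpNucs += pVal
--         else: fpNucs += sum(predicted[i].values())
--
--     fnNucs = 0
--     for i in actual:
--         if i in predicted:
--             for j in actual[i]:
--                 aVal = actual[i][j]
--                 if j in predicted[i]:
--                     if aVal > predicted[i][j]:
--                         fnNucs += aVal - predicted[i][j]
--                 else: fnNucs += aVal
--         else: fnNucs += sum(actual[i].values())
--     return tpNucs, fpNucs, fnNucs
-- ===== SOURCE B (Python) =====
-- def getNucsAccuracy(actual, predicted):
--     """
--     tabulate TP/FP/FN in a single symmetric pass over the union of
--     outer keys (and, per shared outer key, the union of inner keys)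
--     instead of A's two asymmetric passes
--     """
--     tpNucs = 0
--     fpNucs = 0
--     fnNucs = 0
--     outer = list(predicted) + [i for i in actual if i not in predicted]
--     for i in outer:
--         pD = predicted.get(i)
--         aD = actual.get(i)
--         if pD is None:
--             fnNucs += sum(aD.values())
--         elif aD is None:
--             fpNucs += sum(pD.values())
--         else:
--             inner = list(pD) + [j for j in aD if j not in pD]
--             for j in inner:
--                 p = pD.get(j)
--                 a = aD.get(j)
--                 if p is None:
--                     fnNucs += a
--                 elif a is None:
--                     fpNucs += p
--                 else:
--                     tpNucs += min(a, p)
--                     fpNucs += max(0, p - a)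
--                     fnNucs += max(0, a - p)
--     return tpNucs, fpNucs, fnNucs
-- ===== Notes on version B (the rewrite author's own statement) =====
-- stated objective: alternative
-- what changed: B replaces A's two asymmetric passes (predicted-side for TP/FP, actual-side for FN) by a single symmetric pass over the union of outer keys and, per shared key, the union of inner keys, accumulating all three counters at once with min/max closed forms.
import Mathlib
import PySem

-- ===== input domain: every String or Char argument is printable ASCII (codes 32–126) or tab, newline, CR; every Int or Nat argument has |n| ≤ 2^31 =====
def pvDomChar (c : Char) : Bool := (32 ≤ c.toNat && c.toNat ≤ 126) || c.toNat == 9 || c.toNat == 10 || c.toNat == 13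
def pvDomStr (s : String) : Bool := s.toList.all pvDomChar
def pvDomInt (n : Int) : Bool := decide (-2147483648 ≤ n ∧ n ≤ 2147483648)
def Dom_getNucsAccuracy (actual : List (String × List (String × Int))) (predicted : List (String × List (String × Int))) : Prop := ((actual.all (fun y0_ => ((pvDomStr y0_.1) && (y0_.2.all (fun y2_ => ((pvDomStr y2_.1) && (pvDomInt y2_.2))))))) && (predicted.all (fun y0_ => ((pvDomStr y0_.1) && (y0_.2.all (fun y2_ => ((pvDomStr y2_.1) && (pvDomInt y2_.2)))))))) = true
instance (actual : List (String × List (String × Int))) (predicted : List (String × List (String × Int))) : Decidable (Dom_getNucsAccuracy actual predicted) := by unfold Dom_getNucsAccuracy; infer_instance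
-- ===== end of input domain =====

-- B merges A's two asymmetric passes into one symmetric pass over key unions (objective: alternative, same cost).

-- ===== PORT A =====
-- literal transliteration of A: first loop over `predicted` accumulating (tpNucs, fpNucs),
-- second loop over `actual` accumulating fnNucs; every `d[k]` is a first-match lookup.
-- loop body of `for j in predicted[i]` (tp/fp inner loop)
def pvA_inner (aD pD : List (String × Int)) (t : Int × Int) (jp : String × Int) : Int × Int :=
  let pVal := ((PySem.Dict.mk pD).get? jp.1).getD 0
  match (PySem.Dict.mk aD).get? jp.1 with
  | some aVal =>
      let t' := (t.1 + min aVal pVal, t.2)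
      if pVal > aVal then (t'.1, t'.2 + (pVal - aVal)) else t'
  | none => (t.1, t.2 + pVal)

-- loop body of `for i in predicted` (tp/fp outer loop)
def pvA_outer (actual predicted : List (String × List (String × Int))) (s : Int × Int) (ip : String × List (String × Int)) : Int × Int :=
  match (PySem.Dict.mk actual).get? ip.1 with
  | some aD =>
      let pD := ((PySem.Dict.mk predicted).get? ip.1).getD []
      pD.foldl (pvA_inner aD pD) s
  | none => (s.1, s.2 + ((PySem.Dict.mk (((PySem.Dict.mk predicted).get? ip.1).getD [])).values).sum)

-- loop body of `for j in actual[i]` (fn inner loop)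
def pvA_fnInner (aD pD : List (String × Int)) (f : Int) (jp : String × Int) : Int :=
  let aVal := ((PySem.Dict.mk aD).get? jp.1).getD 0
  match (PySem.Dict.mk pD).get? jp.1 with
  | some pVal => if aVal > pVal then f + (aVal - pVal) else f
  | none => f + aVal

-- loop body of `for i in actual` (fn outer loop)
def pvA_fnOuter (actual predicted : List (String × List (String × Int))) (f : Int) (ip : String × List (String × Int)) : Int :=
  match (PySem.Dict.mk predicted).get? ip.1 with
  | some pD =>
      let aD := ((PySem.Dict.mk actual).get? ip.1).getD []
      aD.foldl (pvA_fnInner aD pD) f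
  | none => f + ((PySem.Dict.mk (((PySem.Dict.mk actual).get? ip.1).getD [])).values).sum

def getNucsAccuracy (actual : List (String × List (String × Int))) (predicted : List (String × List (String × Int))) : Int × Int × Int :=
  let tpfp := predicted.foldl (pvA_outer actual predicted) (0, 0)
  let fn := actual.foldl (pvA_fnOuter actual predicted) 0
  (tpfp.1, tpfp.2, fn)

-- ===== PORT B =====
-- literal transliteration of B (Source B): one pass over the union of outer keys; per shared
-- outer key one pass over the union of inner keys, accumulating (tp, fp, fn) together.
-- loop body of `for j in inner`
def pvB_inner (aD pD : List (String × Int)) (t : Int × Int × Int) (j : String) : Int × Int × Int :=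
  match (PySem.Dict.mk pD).get? j, (PySem.Dict.mk aD).get? j with
  | none, some a => (t.1, t.2.1, t.2.2 + a)
  | some p, none => (t.1, t.2.1 + p, t.2.2)
  | some p, some a => (t.1 + min a p, t.2.1 + max 0 (p - a), t.2.2 + max 0 (a - p))
  | none, none => t   -- unreachable: j is drawn from the union of the two key lists

-- loop body of `for i in outer`
def pvB_outer (actual predicted : List (String × List (String × Int))) (s : Int × Int × Int) (i : String) : Int × Int × Int :=
  match (PySem.Dict.mk predicted).get? i, (PySem.Dict.mk actual).get? i with
  | none, some aD => (s.1, s.2.1, s.2.2 + ((PySem.Dict.mk aD).values).sum)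
  | some pD, none => (s.1, s.2.1 + ((PySem.Dict.mk pD).values).sum, s.2.2)
  | some pD, some aD =>
      (pD.map Prod.fst ++ (aD.map Prod.fst).filter (fun j => !((PySem.Dict.mk pD).contains j))).foldl (pvB_inner aD pD) s
  | none, none => s   -- unreachable: i is drawn from the union of the two key lists

def getNucsAccuracy_alt (actual : List (String × List (String × Int))) (predicted : List (String × List (String × Int))) : Int × Int × Int :=
  (predicted.map Prod.fst ++ (actual.map Prod.fst).filter (fun i => !((PySem.Dict.mk predicted).contains i))).foldl
    (pvB_outer actual predicted) (0, 0, 0)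

-- ===== PRECONDITION & SPEC =====
-- Pre_ excludes association lists with duplicate outer or inner keys: the Python arguments
-- are dicts, whose key lists are necessarily duplicate-free, so such lists encode no dict.
def Pre_getNucsAccuracy (actual : List (String × List (String × Int))) (predicted : List (String × List (String × Int))) : Prop :=
  (actual.map Prod.fst).Nodup ∧ (predicted.map Prod.fst).Nodup ∧
  (∀ x ∈ actual, (x.2.map Prod.fst).Nodup) ∧ (∀ x ∈ predicted, (x.2.map Prod.fst).Nodup)
instance (actual : List (String × List (String × Int))) (predicted : List (String × List (String × Int))) : Decidable (Pre_getNucsAccuracy actual predicted) := by unfold Pre_getNucsAccuracy; infer_instance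

def pvWitness_getNucsAccuracy : (List (String × List (String × Int))) × (List (String × List (String × Int))) :=
  ([("A", [("C", 2)])], [("A", [("C", 1), ("G", 3)])])

def Spec_getNucsAccuracy (actual : List (String × List (String × Int))) (predicted : List (String × List (String × Int))) (out : Int × Int × Int) : Prop := out = getNucsAccuracy_alt actual predicted
instance (actual : List (String × List (String × Int))) (predicted : List (String × List (String × Int))) (out : Int × Int × Int) : Decidable (Spec_getNucsAccuracy actual predicted out) := by unfold Spec_getNucsAccuracy; infer_instance

-- ===== CLAIM (what is proved, stated in full; the proofs are below) =====
def Claim_equal_getNucsAccuracy : Prop := ∀ (actual : List (String × List (String × Int))) (predicted : List (String × List (String × Int))), Dom_getNucsAccuracy actual predicted → Pre_getNucsAccuracy actual predicted → Spec_getNucsAccuracy actual predicted (getNucsAccuracy actual predicted)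

-- ===== LEMMAS AND PROOFS =====

-- per-entry contribution of A's tp/fp inner loop
def pvAIn (aD pD : List (String × Int)) (j : String) : Int × Int :=
  let pVal := ((PySem.Dict.mk pD).get? j).getD 0
  match (PySem.Dict.mk aD).get? j with
  | some aVal => (min aVal pVal, if pVal > aVal then pVal - aVal else 0)
  | none => (0, pVal)

-- per-entry contribution of A's tp/fp outer loop
def pvAOut (actual predicted : List (String × List (String × Int))) (i : String) : Int × Int :=
  match (PySem.Dict.mk actual).get? i with
  | some aD =>
      let pD := ((PySem.Dict.mk predicted).get? i).getD []
      ((pD.map (fun jp => (pvAIn aD pD jp.1).1)).sum, (pD.map (fun jp => (pvAIn aD pD jp.1).2)).sum)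
  | none => (0, ((((PySem.Dict.mk predicted).get? i).getD []).map Prod.snd).sum)

-- per-entry contribution of A's fn inner loop
def pvFIn (aD pD : List (String × Int)) (j : String) : Int :=
  let aVal := ((PySem.Dict.mk aD).get? j).getD 0
  match (PySem.Dict.mk pD).get? j with
  | some pVal => if aVal > pVal then aVal - pVal else 0
  | none => aVal

-- per-entry contribution of A's fn outer loop
def pvFOut (actual predicted : List (String × List (String × Int))) (i : String) : Int :=
  match (PySem.Dict.mk predicted).get? i with
  | some pD =>
      let aD := ((PySem.Dict.mk actual).get? i).getD []
      (aD.map (fun jp => pvFIn aD pD jp.1)).sum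
  | none => ((((PySem.Dict.mk actual).get? i).getD []).map Prod.snd).sum

-- per-key contribution of B's inner loop
def pvBIn (aD pD : List (String × Int)) (j : String) : Int × Int × Int :=
  match (PySem.Dict.mk pD).get? j, (PySem.Dict.mk aD).get? j with
  | none, some a => (0, 0, a)
  | some p, none => (0, p, 0)
  | some p, some a => (min a p, max 0 (p - a), max 0 (a - p))
  | none, none => (0, 0, 0)

-- per-key contribution of B's outer loop
def pvBOut (actual predicted : List (String × List (String × Int))) (i : String) : Int × Int × Int :=
  match (PySem.Dict.mk predicted).get? i, (PySem.Dict.mk actual).get? i with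
  | none, some aD => (0, 0, (aD.map Prod.snd).sum)
  | some pD, none => (0, (pD.map Prod.snd).sum, 0)
  | some pD, some aD =>
      let U := pD.map Prod.fst ++ (aD.map Prod.fst).filter (fun j => !((PySem.Dict.mk pD).contains j))
      ((U.map (fun j => (pvBIn aD pD j).1)).sum,
       (U.map (fun j => (pvBIn aD pD j).2.1)).sum,
       (U.map (fun j => (pvBIn aD pD j).2.2)).sum)
  | none, none => (0, 0, 0)

-- generic: an additive fold over a pair state is the pair of sums
lemma pvFoldP {α : Type} (step : Int × Int → α → Int × Int) (f : α → Int × Int)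
    (h : ∀ t x, step t x = (t.1 + (f x).1, t.2 + (f x).2)) :
    ∀ (l : List α) (s : Int × Int),
      l.foldl step s = (s.1 + (l.map (fun x => (f x).1)).sum, s.2 + (l.map (fun x => (f x).2)).sum) := by
  intro l
  induction l with
  | nil => intro s; simp
  | cons x xs ih =>
      intro s
      simp only [List.foldl_cons, List.map_cons, List.sum_cons, h, ih, Prod.mk.injEq]
      constructor <;> ring

-- generic: an additive fold over a triple state is the triple of sums
lemma pvFoldT {α : Type} (step : Int × Int × Int → α → Int × Int × Int) (f : α → Int × Int × Int)
    (h : ∀ t x, step t x = (t.1 + (f x).1, t.2.1 + (f x).2.1, t.2.2 + (f x).2.2)) :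
    ∀ (l : List α) (s : Int × Int × Int),
      l.foldl step s = (s.1 + (l.map (fun x => (f x).1)).sum,
                        s.2.1 + (l.map (fun x => (f x).2.1)).sum,
                        s.2.2 + (l.map (fun x => (f x).2.2)).sum) := by
  intro l
  induction l with
  | nil => intro s; simp
  | cons x xs ih =>
      intro s
      simp only [List.foldl_cons, List.map_cons, List.sum_cons, h, ih, Prod.mk.injEq]
      refine ⟨by ring, by ring, by ring⟩

-- generic: an additive fold over an Int state is the sum
lemma pvFoldI {α : Type} (step : Int → α → Int) (f : α → Int)
    (h : ∀ t x, step t x = t + f x) :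
    ∀ (l : List α) (s : Int), l.foldl step s = s + (l.map f).sum := by
  intro l
  induction l with
  | nil => intro s; simp
  | cons x xs ih =>
      intro s
      simp only [List.foldl_cons, List.map_cons, List.sum_cons, h, ih]
      ring

-- dict-as-list lookup facts
lemma pvGetSome {ν : Type} (l : List (String × ν)) (k : String) (h : k ∈ l.map Prod.fst) :
    ∃ v, (PySem.Dict.mk l).get? k = some v := by
  rcases ho : (PySem.Dict.mk l).get? k with _ | v
  · exact absurd ((PySem.Dict.get?_eq_none_iff_not_mem_keys _ _).1 ho)
      (by simpa [PySem.Dict.keys_mk] using h)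
  · exact ⟨v, rfl⟩

lemma pvGetNone {ν : Type} (l : List (String × ν)) (k : String) (h : k ∉ l.map Prod.fst) :
    (PySem.Dict.mk l).get? k = none := by
  rw [PySem.Dict.get?_eq_none_iff_not_mem_keys, PySem.Dict.keys_mk]
  exact h

lemma pvContainsIff {ν : Type} (l : List (String × ν)) (k : String) :
    (PySem.Dict.mk l).contains k = true ↔ k ∈ l.map Prod.fst := by
  rw [PySem.Dict.contains_iff_mem_keys, PySem.Dict.keys_mk]

lemma pvGetMem {ν : Type} (l : List (String × ν)) (k : String) (v : ν)
    (h : (PySem.Dict.mk l).get? k = some v) : (k, v) ∈ l :=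
  PySem.Dict.mem_items_of_get?_eq_some _ h

-- sum over a list = sum over a filter plus sum over its complement
lemma pvSumSplit (l : List String) (f : String → Int) (q : String → Bool) :
    (l.map f).sum = ((l.filter q).map f).sum + ((l.filter (fun x => !q x)).map f).sum := by
  have hp := (List.filter_append_perm q l).map f
  rw [← hp.sum_eq, List.map_append, List.sum_append]

lemma pvSumZero (l : List String) (f : String → Int) (h : ∀ x ∈ l, f x = 0) :
    (l.map f).sum = 0 := by
  apply List.sum_eq_zero
  intro y hy
  rcases List.mem_map.1 hy with ⟨x, hx, rfl⟩
  exact h x hx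

-- sums over two duplicate-free lists with the same members agree
lemma pvSumPerm (l₁ l₂ : List String) (f : String → Int)
    (h1 : l₁.Nodup) (h2 : l₂.Nodup) (h : ∀ a, a ∈ l₁ ↔ a ∈ l₂) :
    (l₁.map f).sum = (l₂.map f).sum :=
  (((List.perm_ext_iff_of_nodup h1 h2).2 h).map f).sum_eq

-- A's loop bodies are additive with the stated contributions
lemma pvA_inner_add (aD pD : List (String × Int)) (t : Int × Int) (jp : String × Int) :
    pvA_inner aD pD t jp = (t.1 + (pvAIn aD pD jp.1).1, t.2 + (pvAIn aD pD jp.1).2) := by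
  simp only [pvA_inner, pvAIn]
  rcases (PySem.Dict.mk aD).get? jp.1 with _ | aVal
  · simp
  · simp only []
    split_ifs <;> simp

lemma pvA_fnInner_add (aD pD : List (String × Int)) (t : Int) (jp : String × Int) :
    pvA_fnInner aD pD t jp = t + pvFIn aD pD jp.1 := by
  simp only [pvA_fnInner, pvFIn]
  rcases (PySem.Dict.mk pD).get? jp.1 with _ | pVal
  · simp
  · simp only []
    split_ifs <;> simp

lemma pvA_outer_add (actual predicted : List (String × List (String × Int)))
    (s : Int × Int) (ip : String × List (String × Int)) :
    pvA_outer actual predicted s ip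
      = (s.1 + (pvAOut actual predicted ip.1).1, s.2 + (pvAOut actual predicted ip.1).2) := by
  simp only [pvA_outer, pvAOut]
  rcases (PySem.Dict.mk actual).get? ip.1 with _ | aD
  · simp
  · simp only []
    rw [pvFoldP _ _ (pvA_inner_add aD _)]

lemma pvA_fnOuter_add (actual predicted : List (String × List (String × Int)))
    (t : Int) (ip : String × List (String × Int)) :
    pvA_fnOuter actual predicted t ip = t + pvFOut actual predicted ip.1 := by
  simp only [pvA_fnOuter, pvFOut]
  rcases (PySem.Dict.mk predicted).get? ip.1 with _ | pD
  · simp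
  · simp only []
    rw [pvFoldI _ _ (pvA_fnInner_add _ pD)]

-- B's loop bodies are additive with the stated contributions
lemma pvB_inner_add (aD pD : List (String × Int)) (t : Int × Int × Int) (j : String) :
    pvB_inner aD pD t j
      = (t.1 + (pvBIn aD pD j).1, t.2.1 + (pvBIn aD pD j).2.1, t.2.2 + (pvBIn aD pD j).2.2) := by
  simp only [pvB_inner, pvBIn]
  rcases (PySem.Dict.mk pD).get? j with _ | p <;> rcases (PySem.Dict.mk aD).get? j with _ | a <;> simp

lemma pvB_outer_add (actual predicted : List (String × List (String × Int)))
    (s : Int × Int × Int) (i : String) :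
    pvB_outer actual predicted s i
      = (s.1 + (pvBOut actual predicted i).1,
         s.2.1 + (pvBOut actual predicted i).2.1,
         s.2.2 + (pvBOut actual predicted i).2.2) := by
  simp only [pvB_outer, pvBOut]
  rcases (PySem.Dict.mk predicted).get? i with _ | pD <;> rcases (PySem.Dict.mk actual).get? i with _ | aD
  · simp
  · simp [PySem.Dict.values_mk]
  · simp [PySem.Dict.values_mk]
  · simp only []
    rw [pvFoldT _ _ (pvB_inner_add aD pD)]

-- the two ports as sums of contributions
lemma pvA_eval (actual predicted : List (String × List (String × Int))) :
    getNucsAccuracy actual predicted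
      = ((predicted.map (fun ip => (pvAOut actual predicted ip.1).1)).sum,
         (predicted.map (fun ip => (pvAOut actual predicted ip.1).2)).sum,
         (actual.map (fun ip => pvFOut actual predicted ip.1)).sum) := by
  simp only [getNucsAccuracy]
  rw [pvFoldP _ _ (pvA_outer_add actual predicted), pvFoldI _ _ (pvA_fnOuter_add actual predicted)]
  simp

lemma pvB_eval (actual predicted : List (String × List (String × Int))) :
    getNucsAccuracy_alt actual predicted
      = (((predicted.map Prod.fst ++ (actual.map Prod.fst).filter (fun i => !((PySem.Dict.mk predicted).contains i))).map
            (fun i => (pvBOut actual predicted i).1)).sum,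
         ((predicted.map Prod.fst ++ (actual.map Prod.fst).filter (fun i => !((PySem.Dict.mk predicted).contains i))).map
            (fun i => (pvBOut actual predicted i).2.1)).sum,
         ((predicted.map Prod.fst ++ (actual.map Prod.fst).filter (fun i => !((PySem.Dict.mk predicted).contains i))).map
            (fun i => (pvBOut actual predicted i).2.2)).sum) := by
  simp only [getNucsAccuracy_alt]
  rw [pvFoldT _ _ (pvB_outer_add actual predicted)]
  simp

-- inner level: on the tp and fp components B's union pass agrees with A's predicted-side pass
lemma pvInnerTF (aD pD : List (String × Int)) :
    (((pD.map Prod.fst ++ (aD.map Prod.fst).filter (fun j => !((PySem.Dict.mk pD).contains j))).map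
        (fun j => (pvBIn aD pD j).1)).sum
      = (pD.map (fun jp => (pvAIn aD pD jp.1).1)).sum)
    ∧ (((pD.map Prod.fst ++ (aD.map Prod.fst).filter (fun j => !((PySem.Dict.mk pD).contains j))).map
        (fun j => (pvBIn aD pD j).2.1)).sum
      = (pD.map (fun jp => (pvAIn aD pD jp.1).2)).sum) := by
  have hz1 : ∀ j ∈ (aD.map Prod.fst).filter (fun j => !((PySem.Dict.mk pD).contains j)),
      (pvBIn aD pD j).1 = 0 ∧ (pvBIn aD pD j).2.1 = 0 := by
    intro j hj
    rcases List.mem_filter.1 hj with ⟨hja, hjc⟩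
    have hn : (PySem.Dict.mk pD).get? j = none := by
      apply pvGetNone
      intro hmem
      rw [(pvContainsIff pD j).2 hmem] at hjc
      simp at hjc
    simp only [pvBIn, hn]
    rcases (PySem.Dict.mk aD).get? j with _ | a <;> simp
  have hcong : ∀ j ∈ pD.map Prod.fst,
      (pvBIn aD pD j).1 = (pvAIn aD pD j).1 ∧ (pvBIn aD pD j).2.1 = (pvAIn aD pD j).2 := by
    intro j hj
    rcases pvGetSome pD j hj with ⟨p, hp⟩
    simp only [pvBIn, pvAIn, hp]
    rcases (PySem.Dict.mk aD).get? j with _ | a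
    · simp
    · simp only [Option.getD_some]
      constructor
      all_goals first | trivial | (split_ifs <;> omega)
  have hmm : ∀ (g : String → Int), pD.map (fun jp => g jp.1) = (pD.map Prod.fst).map g := by
    intro g; rw [List.map_map]; rfl
  constructor
  · rw [List.map_append, List.sum_append, pvSumZero _ _ (fun j hj => (hz1 j hj).1), add_zero,
        hmm (fun j => (pvAIn aD pD j).1)]
    exact congrArg List.sum (List.map_congr_left (fun j hj => (hcong j hj).1))
  · rw [List.map_append, List.sum_append, pvSumZero _ _ (fun j hj => (hz1 j hj).2), add_zero,
        hmm (fun j => (pvAIn aD pD j).2)]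
    exact congrArg List.sum (List.map_congr_left (fun j hj => (hcong j hj).2))

-- inner level, fn component: B's union pass agrees with A's actual-side pass (duplicate-free inner keys)
lemma pvInnerFN (aD pD : List (String × Int))
    (ha : (aD.map Prod.fst).Nodup) (hp : (pD.map Prod.fst).Nodup) :
    ((pD.map Prod.fst ++ (aD.map Prod.fst).filter (fun j => !((PySem.Dict.mk pD).contains j))).map
        (fun j => (pvBIn aD pD j).2.2)).sum
      = (aD.map (fun jp => pvFIn aD pD jp.1)).sum := by
  have hmm : aD.map (fun jp => pvFIn aD pD jp.1) = (aD.map Prod.fst).map (pvFIn aD pD) := by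
    rw [List.map_map]; rfl
  rw [List.map_append, List.sum_append, hmm,
      pvSumSplit (aD.map Prod.fst) (pvFIn aD pD) (fun j => (PySem.Dict.mk pD).contains j)]
  -- second chunks agree termwise
  have h2 : (((aD.map Prod.fst).filter (fun j => !((PySem.Dict.mk pD).contains j))).map
      (fun j => (pvBIn aD pD j).2.2)).sum
      = (((aD.map Prod.fst).filter (fun j => !((PySem.Dict.mk pD).contains j))).map (pvFIn aD pD)).sum := by
    apply congrArg List.sum
    apply List.map_congr_left
    intro j hj
    rcases List.mem_filter.1 hj with ⟨hja, hjc⟩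
    have hn : (PySem.Dict.mk pD).get? j = none := by
      apply pvGetNone
      intro hmem
      rw [(pvContainsIff pD j).2 hmem] at hjc
      simp at hjc
    rcases pvGetSome aD j hja with ⟨a, hga⟩
    simp [pvBIn, pvFIn, hn, hga]
  -- first chunk: restrict to keys also in aD, then permute
  have h1 : ((pD.map Prod.fst).map (fun j => (pvBIn aD pD j).2.2)).sum
      = (((aD.map Prod.fst).filter (fun j => (PySem.Dict.mk pD).contains j)).map (pvFIn aD pD)).sum := by
    rw [pvSumSplit (pD.map Prod.fst) (fun j => (pvBIn aD pD j).2.2)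
          (fun j => (PySem.Dict.mk aD).contains j)]
    have hz : ∀ j ∈ (pD.map Prod.fst).filter (fun j => !((PySem.Dict.mk aD).contains j)),
        (pvBIn aD pD j).2.2 = 0 := by
      intro j hj
      rcases List.mem_filter.1 hj with ⟨hjp, hjc⟩
      have hn : (PySem.Dict.mk aD).get? j = none := by
        apply pvGetNone
        intro hmem
        rw [(pvContainsIff aD j).2 hmem] at hjc
        simp at hjc
      simp only [pvBIn, hn]
      rcases (PySem.Dict.mk pD).get? j with _ | p <;> simp
    rw [pvSumZero _ _ hz, add_zero]
    have hcong : ((pD.map Prod.fst).filter (fun j => (PySem.Dict.mk aD).contains j)).map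
        (fun j => (pvBIn aD pD j).2.2)
        = ((pD.map Prod.fst).filter (fun j => (PySem.Dict.mk aD).contains j)).map (pvFIn aD pD) := by
      apply List.map_congr_left
      intro j hj
      rcases List.mem_filter.1 hj with ⟨hjp, hjc⟩
      rcases pvGetSome pD j hjp with ⟨p, hgp⟩
      rcases pvGetSome aD j ((pvContainsIff aD j).1 hjc) with ⟨a, hga⟩
      simp only [pvBIn, pvFIn, hgp, hga, Option.getD_some]
      first | trivial | (split_ifs <;> omega)
    rw [hcong]
    apply pvSumPerm _ _ _ (hp.filter _) (ha.filter _)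
    intro j
    constructor
    · intro hj
      rcases List.mem_filter.1 hj with ⟨hjp, hjc⟩
      exact List.mem_filter.2 ⟨(pvContainsIff aD j).1 hjc, (pvContainsIff pD j).2 hjp⟩
    · intro hj
      rcases List.mem_filter.1 hj with ⟨hja, hjc⟩
      exact List.mem_filter.2 ⟨(pvContainsIff pD j).1 hjc, (pvContainsIff aD j).2 hja⟩
  rw [h1, h2]

-- outer level, shared keys: B's contribution projects to A's tp/fp contribution
lemma pvOutTF (actual predicted : List (String × List (String × Int))) (i : String)
    (hi : i ∈ predicted.map Prod.fst) :
    (pvBOut actual predicted i).1 = (pvAOut actual predicted i).1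
    ∧ (pvBOut actual predicted i).2.1 = (pvAOut actual predicted i).2 := by
  rcases pvGetSome predicted i hi with ⟨pD, hgp⟩
  rcases hga : (PySem.Dict.mk actual).get? i with _ | aD
  · simp [pvBOut, pvAOut, hgp, hga]
  · simp only [pvBOut, pvAOut, hgp, hga, Option.getD_some]
    exact ⟨(pvInnerTF aD pD).1, (pvInnerTF aD pD).2⟩

-- ===== VERDICT (by name: the statement is the Claim_ definition above) =====
theorem getNucsAccuracy_spec : Claim_equal_getNucsAccuracy := by
  intro actual predicted _hdom hpre
  obtain ⟨hna, hnp, hia, hip⟩ := hpre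
  unfold Spec_getNucsAccuracy
  rw [pvA_eval, pvB_eval]
  have hmmP : ∀ (g : String → Int), predicted.map (fun ip => g ip.1) = (predicted.map Prod.fst).map g := by
    intro g; rw [List.map_map]; rfl
  have hmmA : ∀ (g : String → Int), actual.map (fun ip => g ip.1) = (actual.map Prod.fst).map g := by
    intro g; rw [List.map_map]; rfl
  -- the actual-only tail contributes nothing to tp and fp
  have hz : ∀ i ∈ (actual.map Prod.fst).filter (fun i => !((PySem.Dict.mk predicted).contains i)),
      (pvBOut actual predicted i).1 = 0 ∧ (pvBOut actual predicted i).2.1 = 0 := by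
    intro i hi
    rcases List.mem_filter.1 hi with ⟨hia', hic⟩
    have hn : (PySem.Dict.mk predicted).get? i = none := by
      apply pvGetNone
      intro hmem
      rw [(pvContainsIff predicted i).2 hmem] at hic
      simp at hic
    simp only [pvBOut, hn]
    rcases (PySem.Dict.mk actual).get? i with _ | aD <;> simp
  refine Prod.ext ?_ (Prod.ext ?_ ?_)
  -- tp component
  · simp only []
    rw [List.map_append, List.sum_append, pvSumZero _ _ (fun i hi => (hz i hi).1), add_zero,
        hmmP (fun i => (pvAOut actual predicted i).1)]
    exact (congrArg List.sum (List.map_congr_left (fun i hi => (pvOutTF actual predicted i hi).1))).symm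
  -- fp component
  · simp only []
    rw [List.map_append, List.sum_append, pvSumZero _ _ (fun i hi => (hz i hi).2), add_zero,
        hmmP (fun i => (pvAOut actual predicted i).2)]
    exact (congrArg List.sum (List.map_congr_left (fun i hi => (pvOutTF actual predicted i hi).2))).symm
  -- fn component
  · simp only []
    rw [hmmA (pvFOut actual predicted), List.map_append, List.sum_append,
        pvSumSplit (actual.map Prod.fst) (pvFOut actual predicted)
          (fun i => (PySem.Dict.mk predicted).contains i)]
    -- actual-only chunks agree termwise
    have h2 : (((actual.map Prod.fst).filter (fun i => !((PySem.Dict.mk predicted).contains i))).map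
        (pvFOut actual predicted)).sum
        = (((actual.map Prod.fst).filter (fun i => !((PySem.Dict.mk predicted).contains i))).map
            (fun i => (pvBOut actual predicted i).2.2)).sum := by
      apply congrArg List.sum
      apply List.map_congr_left
      intro i hi
      rcases List.mem_filter.1 hi with ⟨hia', hic⟩
      have hn : (PySem.Dict.mk predicted).get? i = none := by
        apply pvGetNone
        intro hmem
        rw [(pvContainsIff predicted i).2 hmem] at hic
        simp at hic
      rcases pvGetSome actual i hia' with ⟨aD, hga⟩
      simp [pvFOut, pvBOut, hn, hga]
    -- predicted-side chunk: restrict to shared keys, then permute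
    have h1 : ((predicted.map Prod.fst).map (fun i => (pvBOut actual predicted i).2.2)).sum
        = (((actual.map Prod.fst).filter (fun i => (PySem.Dict.mk predicted).contains i)).map
            (pvFOut actual predicted)).sum := by
      rw [pvSumSplit (predicted.map Prod.fst) (fun i => (pvBOut actual predicted i).2.2)
            (fun i => (PySem.Dict.mk actual).contains i)]
      have hz' : ∀ i ∈ (predicted.map Prod.fst).filter (fun i => !((PySem.Dict.mk actual).contains i)),
          (pvBOut actual predicted i).2.2 = 0 := by
        intro i hi
        rcases List.mem_filter.1 hi with ⟨hip', hic⟩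
        have hn : (PySem.Dict.mk actual).get? i = none := by
          apply pvGetNone
          intro hmem
          rw [(pvContainsIff actual i).2 hmem] at hic
          simp at hic
        simp only [pvBOut, hn]
        rcases (PySem.Dict.mk predicted).get? i with _ | pD <;> simp
      rw [pvSumZero _ _ hz', add_zero]
      have hcong : ((predicted.map Prod.fst).filter (fun i => (PySem.Dict.mk actual).contains i)).map
          (fun i => (pvBOut actual predicted i).2.2)
          = ((predicted.map Prod.fst).filter (fun i => (PySem.Dict.mk actual).contains i)).map
              (pvFOut actual predicted) := by
        apply List.map_congr_left
        intro i hi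
        rcases List.mem_filter.1 hi with ⟨hip', hic⟩
        rcases pvGetSome predicted i hip' with ⟨pD, hgp⟩
        rcases pvGetSome actual i ((pvContainsIff actual i).1 hic) with ⟨aD, hga⟩
        have hnda : (aD.map Prod.fst).Nodup := hia (i, aD) (pvGetMem actual i aD hga)
        have hndp : (pD.map Prod.fst).Nodup := hip (i, pD) (pvGetMem predicted i pD hgp)
        simp only [pvBOut, pvFOut, hgp, hga, Option.getD_some]
        exact pvInnerFN aD pD hnda hndp
      rw [hcong]
      apply pvSumPerm _ _ _ (hnp.filter _) (hna.filter _)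
      intro i
      constructor
      · intro hi
        rcases List.mem_filter.1 hi with ⟨hip', hic⟩
        exact List.mem_filter.2 ⟨(pvContainsIff actual i).1 hic, (pvContainsIff predicted i).2 hip'⟩
      · intro hi
        rcases List.mem_filter.1 hi with ⟨hia', hic⟩
        exact List.mem_filter.2 ⟨(pvContainsIff predicted i).1 hic, (pvContainsIff actual i).2 hia'⟩
    rw [h1, h2]
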